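-- pv_equiv track=rewrite | github.com/medasaicharan6/Geektrust-Backend-Challenges | Tame_of_thrones.py | does_support
-- ===== SOURCE A (Python) =====
-- import string
--
-- alphabets_list=list(string.ascii_uppercase)
--
-- Name_emblem_dict={'SPACE':'Gorilla','LAND':'Panda','WATER':'octopus',
--                   'ICE':'Mammoth','AIR':'Owl','FIRE':'Dragon'}
--
-- def decipher(Encoded_string,key):
--     decoded_string=""
--     Encoded_string_list=list(Encoded_string)
--     for i in Encoded_string_list:
--         if i.upper() in alphabets_list:
--             i_index=alphabets_list.index(i.upper())
--             decoded_string+=alphabets_list[i_index-key]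
--         else:
--             decoded_string+=i
--     return(decoded_string)
--
-- def count(string,char):
--     count=0
--     for i in string:
--         if i.upper()==char.upper():
--             count+=1
--     return count
--
-- def does_support(Input):
--     Input=Input.split(" ",1)
--     Input_emblem=Name_emblem_dict[Input[0]]
--     decoded_message=decipher(Input[-1],len(Input_emblem))
--     flag=True
--     for i in Input_emblem:
--         if count(Input_emblem,i)>count(decoded_message,i):
--             flag=False
--             break
--     return (flag,Input[0])
-- ===== SOURCE B (Python) =====
-- Name_emblem_dict={'SPACE':'Gorilla','LAND':'Panda','WATER':'octopus',
--                   'ICE':'Mammoth','AIR':'Owl','FIRE':'Dragon'}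
--
-- def does_support(Input):
--     parts = Input.split(" ", 1)
--     name = parts[0]
--     emblem = Name_emblem_dict[name]
--     key = len(emblem) % 26
--     pool = [c.upper() for c in parts[-1]]
--     flag = True
--     for c in emblem.upper():
--         e = chr((ord(c) - 65 + key) % 26 + 65)
--         if e in pool:
--             pool.remove(e)
--         else:
--             flag = False
--             break
--     return (flag, name)
-- ===== Notes on version B (the rewrite author's own statement) =====
-- stated objective: alternative
-- what changed: B never decodes the message and never counts: it shifts each emblem letter FORWARD by len(emblem) mod 26 to the encoded letter it must find and consumes one matching occurrence from a pool of the uppercased raw message (list.remove), failing at the first letter whose match is missing, instead of A's build-the-decoded-string then per-emblem-letter count-and-compare scans.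
import Mathlib
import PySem

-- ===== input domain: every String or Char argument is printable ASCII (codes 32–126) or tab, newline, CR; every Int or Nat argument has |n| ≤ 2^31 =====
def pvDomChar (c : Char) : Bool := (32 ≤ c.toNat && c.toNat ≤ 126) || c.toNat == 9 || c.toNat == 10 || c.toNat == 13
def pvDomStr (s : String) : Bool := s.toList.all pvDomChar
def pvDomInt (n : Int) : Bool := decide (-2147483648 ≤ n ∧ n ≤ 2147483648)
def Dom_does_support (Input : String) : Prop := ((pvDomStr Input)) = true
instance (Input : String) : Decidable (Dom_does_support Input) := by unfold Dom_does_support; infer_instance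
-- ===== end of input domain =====

-- B shifts each emblem letter forward by len(emblem) mod 26 and consumes one matching occurrence
-- from a pool of the uppercased raw message, never building the decoded string; objective: alternative.

-- ===== PORT A =====
def alphabets_list : List Char :=
  ['A','B','C','D','E','F','G','H','I','J','K','L','M','N','O','P','Q','R','S','T','U','V','W','X','Y','Z']

def Name_emblem_dict : PySem.Dict String String :=
  PySem.Dict.ofList [("SPACE","Gorilla"),("LAND","Panda"),("WATER","octopus"),
                     ("ICE","Mammoth"),("AIR","Owl"),("FIRE","Dragon")]

-- alphabets_list[alphabets_list.index(u) - key]: the .index always succeeds (guarded by the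
-- membership test) and the possibly negative index is always in range, so the getD defaults are unreachable
def decChar (key : Int) (u : Char) : Char :=
  (PySem.List.pyGet? alphabets_list
    ((((PySem.List.index? alphabets_list u).getD 0 : Nat) : Int) - key)).getD ' '

def decipher (Encoded_string : List Char) (key : Int) : List Char :=
  Encoded_string.foldl (fun decoded i =>
    if alphabets_list.contains (PySem.Chars.upperChar i) then
      decoded ++ [decChar key (PySem.Chars.upperChar i)]
    else decoded ++ [i]) []

def count_py (s : List Char) (char : Char) : Int :=
  s.foldl (fun count i => if PySem.Chars.upperChar i == PySem.Chars.upperChar char then count + 1 else count) 0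

-- the for-loop with `flag=False; break`: return false at the first under-covered letter
def supportLoop (emblem decoded : List Char) : List Char → Bool
  | [] => true
  | i :: rest => if count_py emblem i > count_py decoded i then false else supportLoop emblem decoded rest

def does_support (Input : String) : Bool × String :=
  let parts := (PySem.Str.splitMax? Input " " 1).getD []   -- sep ≠ "": never none
  let name := (PySem.List.pyGet? parts 0).getD ""          -- split returns ≥ 1 piece: never none
  -- Python raises KeyError when name is not a key; Pre_ excludes those inputs, so the getD "" is unreachable
  let emblem := ((Name_emblem_dict.get? name).getD "").toList
  let decoded := decipher (((PySem.List.pyGet? parts (-1)).getD "").toList) (emblem.length : Int)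
  (supportLoop emblem decoded emblem, name)

-- ===== PORT B =====
-- chr((ord(c) - 65 + key) % 26 + 65): only ever applied to A-Z letters of the fixed emblems
def encodeChar (key : Nat) (c : Char) : Char :=
  Char.ofNat ((c.toNat - 65 + key) % 26 + 65)

-- `if e in pool: pool.remove(e) else: flag=False; break`; remove? is some exactly under the contains guard
def matchLoop (key : Nat) : List Char → List Char → Bool
  | _, [] => true
  | pool, c :: rest =>
      let e := encodeChar key c
      if pool.contains e then matchLoop key ((PySem.List.remove? pool e).getD []) rest
      else false

def does_support_alt (Input : String) : Bool × String :=
  let parts := (PySem.Str.splitMax? Input " " 1).getD []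
  let name := (PySem.List.pyGet? parts 0).getD ""
  -- Python raises KeyError when name is not a key; Pre_ excludes those inputs, so the getD "" is unreachable
  let emblem := ((Name_emblem_dict.get? name).getD "").toList
  let key := emblem.length % 26
  let pool := (((PySem.List.pyGet? parts (-1)).getD "").toList).map PySem.Chars.upperChar
  (matchLoop key pool (PySem.Chars.upper emblem), name)

-- ===== PRECONDITION & SPEC =====
-- Pre_ excludes exactly the inputs whose first space-separated token is not one of the six kingdom
-- names: there the Python A raises KeyError (returns nothing); B raises the same KeyError there.
def Pre_does_support (Input : String) : Prop :=
  Name_emblem_dict.contains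
    ((PySem.List.pyGet? ((PySem.Str.splitMax? Input " " 1).getD []) 0).getD "") = true
instance (Input : String) : Decidable (Pre_does_support Input) := by unfold Pre_does_support; infer_instance

def pvWitness_does_support : String := "SPACE ATTMOPDNLFZ"

def Spec_does_support (Input : String) (out : Bool × String) : Prop := out = does_support_alt Input
instance (Input : String) (out : Bool × String) : Decidable (Spec_does_support Input out) := by unfold Spec_does_support; infer_instance

-- ===== CLAIM (what is proved, stated in full; the proofs are below) =====
def Claim_equal_does_support : Prop := ∀ (Input : String), Dom_does_support Input → Pre_does_support Input → Spec_does_support Input (does_support Input)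

-- ===== LEMMAS AND PROOFS =====

-- the per-character predicate A's letter count reduces to
def pA (key : Int) (U : Char) (c : Char) : Bool :=
  PySem.Chars.upperChar (if alphabets_list.contains (PySem.Chars.upperChar c) then
    decChar key (PySem.Chars.upperChar c) else c) == U

-- decode-then-compare equals compare-to-the-forward-shift, for all 26 letters and the 4 emblem lengths
def chk : Bool := ([3,5,6,7] : List Nat).all (fun k => alphabets_list.all (fun U => alphabets_list.all (fun u =>
   (PySem.Chars.upperChar (decChar ((k : Nat) : Int) u) == U) == (u == encodeChar k U))))

-- forward shift stays in A-Z and is injective there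
def chk2 : Bool := ([3,5,6,7] : List Nat).all (fun k => alphabets_list.all (fun U =>
   alphabets_list.contains (encodeChar k U) &&
   alphabets_list.all (fun V => (encodeChar k U == encodeChar k V) == (U == V))))

set_option maxHeartbeats 1000000 in
lemma chk_true : chk = true := by decide

set_option maxHeartbeats 1000000 in
lemma chk2_true : chk2 = true := by decide

-- A's decode-count predicate equals "uppercased char is the forward shift of U"
lemma pA_eq_shift (k : Nat) (hk : k ∈ ([3,5,6,7] : List Nat)) (U : Char) (hU : U ∈ alphabets_list)
    (c : Char) : pA (k : Int) U c = (PySem.Chars.upperChar c == encodeChar k U) := by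
  unfold pA
  have hall := chk_true
  unfold chk at hall
  simp only [List.all_eq_true, beq_iff_eq] at hall
  have h2 := chk2_true
  unfold chk2 at h2
  simp only [List.all_eq_true, Bool.and_eq_true] at h2
  by_cases h : PySem.Chars.upperChar c ∈ alphabets_list
  · have hc : alphabets_list.contains (PySem.Chars.upperChar c) = true := by simpa using h
    rw [hc]
    simp only [if_true]
    exact hall k hk U hU _ h
  · have hc : alphabets_list.contains (PySem.Chars.upperChar c) = false := by simpa using h
    rw [hc]
    simp only [Bool.false_eq_true, if_false]
    have hne : PySem.Chars.upperChar c ≠ U := fun e => h (e ▸ hU)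
    have henc : encodeChar k U ∈ alphabets_list := by
      have := (h2 k hk U hU).1; simpa using this
    have hne2 : PySem.Chars.upperChar c ≠ encodeChar k U := fun e => h (e ▸ henc)
    simp [hne, hne2]

lemma supportLoop_eq_all (emblem decoded : List Char) : ∀ l,
    supportLoop emblem decoded l = l.all (fun i => !decide (count_py emblem i > count_py decoded i)) := by
  intro l
  induction l with
  | nil => rfl
  | cons i rest ih =>
    rw [supportLoop, List.all_cons, ih]
    by_cases h : count_py emblem i > count_py decoded i <;> simp [h]

lemma count_py_countP (s : List Char) (c : Char) :
    count_py s c = (s.countP (fun i => PySem.Chars.upperChar i == PySem.Chars.upperChar c) : Int) := by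
  unfold count_py
  rw [PySem.List.foldl_if_add_one (p := fun i => PySem.Chars.upperChar i == PySem.Chars.upperChar c)]
  simp

lemma count_py_upper (em : List Char) (i : Char) :
    count_py em i = (List.count (PySem.Chars.upperChar i) (PySem.Chars.upper em) : Int) := by
  rw [count_py_countP]
  simp only [PySem.Chars.upper]
  rw [List.count_eq_countP, List.countP_map]
  rfl

lemma decipher_eq_map (m : List Char) (key : Int) :
    decipher m key = m.map (fun i => if alphabets_list.contains (PySem.Chars.upperChar i) then
      decChar key (PySem.Chars.upperChar i) else i) := by
  unfold decipher
  have h : ∀ (acc : List Char) (i : Char),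
      (if alphabets_list.contains (PySem.Chars.upperChar i) then
        acc ++ [decChar key (PySem.Chars.upperChar i)] else acc ++ [i])
      = acc ++ [if alphabets_list.contains (PySem.Chars.upperChar i) then
        decChar key (PySem.Chars.upperChar i) else i] := by
    intro acc i; split <;> rfl
  simp only [h]
  rw [PySem.List.foldl_append_singleton_eq_map]
  simp

lemma countA_decipher (m : List Char) (key : Int) (C : Char) :
    count_py (decipher m key) C = (m.countP (pA key (PySem.Chars.upperChar C)) : Int) := by
  rw [count_py_countP, decipher_eq_map, List.countP_map]
  rfl

-- B's pool-consuming loop succeeds exactly when the shifted emblem letters fit into the pool as a multiset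
lemma matchLoop_iff (key : Nat) (req : List Char) : ∀ pool,
    matchLoop key pool req = true ↔ (req.map (encodeChar key)).Subperm pool := by
  induction req with
  | nil => intro pool; simp [matchLoop, List.nil_subperm]
  | cons c rest ih =>
    intro pool
    rw [matchLoop]
    by_cases h : encodeChar key c ∈ pool
    · have hc : pool.contains (encodeChar key c) = true := by simpa using h
      rw [hc, if_pos rfl, PySem.List.remove?_eq_some_erase pool (encodeChar key c) h]
      simp only [Option.getD_some, List.map_cons]
      rw [ih]
      constructor
      · intro hs
        exact ((List.subperm_cons _).mpr hs).trans (List.perm_cons_erase h).symm.subperm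
      · intro hs
        exact (List.subperm_cons _).mp (hs.trans (List.perm_cons_erase h).subperm)
    · have hc : pool.contains (encodeChar key c) = false := by simpa using h
      rw [hc]
      simp only [Bool.false_eq_true, if_false, List.map_cons, false_iff]
      intro hs
      exact h (hs.subset (List.mem_cons_self))

-- A = B for one emblem, stated over the exact expressions of the two ports
lemma flag_bridge (em m : List Char)
    (hk : em.length ∈ ([3,5,6,7] : List Nat))
    (hem : em.all (fun C => alphabets_list.contains (PySem.Chars.upperChar C)) = true) :
    supportLoop em (decipher m (em.length : Int)) em
    = matchLoop (em.length % 26) (m.map PySem.Chars.upperChar) (PySem.Chars.upper em) := by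
  have hem' : ∀ C ∈ em, PySem.Chars.upperChar C ∈ alphabets_list := by simpa using hem
  have hlen : em.length % 26 = em.length := by
    apply Nat.mod_eq_of_lt
    simp only [List.mem_cons, List.not_mem_nil, or_false] at hk
    omega
  have hk' : em.length % 26 ∈ ([3,5,6,7] : List Nat) := by rw [hlen]; exact hk
  have hinj := chk2_true
  unfold chk2 at hinj
  simp only [List.all_eq_true, Bool.and_eq_true, beq_iff_eq] at hinj
  rw [supportLoop_eq_all]
  rw [Bool.eq_iff_iff, List.all_eq_true, matchLoop_iff, List.subperm_ext_iff]
  simp only [PySem.Chars.upper]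
  have hcount : ∀ i ∈ em,
      List.count (encodeChar (em.length % 26) (PySem.Chars.upperChar i))
        (List.map (encodeChar (em.length % 26)) (List.map PySem.Chars.upperChar em))
      = List.count (PySem.Chars.upperChar i) (List.map PySem.Chars.upperChar em) := by
    intro i hi
    rw [List.count_eq_countP, List.count_eq_countP, List.countP_map, List.countP_map, List.countP_map]
    apply List.countP_congr
    intro j hj
    simp only [Function.comp_apply, beq_iff_eq]
    constructor
    · intro e
      have h2 := (hinj (em.length % 26) hk' (PySem.Chars.upperChar j) (hem' j hj)).2
        (PySem.Chars.upperChar i) (hem' i hi)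
      have : (PySem.Chars.upperChar j == PySem.Chars.upperChar i) = true := by
        rw [← h2]; simp [e]
      simpa using this
    · intro e; rw [e]
  have hpool : ∀ i ∈ em,
      List.count (encodeChar (em.length % 26) (PySem.Chars.upperChar i)) (m.map PySem.Chars.upperChar)
      = m.countP (pA (em.length : Int) (PySem.Chars.upperChar i)) := by
    intro i hi
    rw [List.count_eq_countP, List.countP_map]
    apply (List.countP_congr _).symm
    intro c _
    rw [pA_eq_shift em.length (by rw [← hlen]; exact hk') _ (hem' i hi) c, hlen]
    simp [Function.comp]
  constructor
  · intro h x hx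
    simp only [List.map_map, List.mem_map] at hx
    obtain ⟨i, hi, rfl⟩ := hx
    have hA := h i hi
    rw [count_py_upper, countA_decipher] at hA
    simp only [Bool.not_eq_eq_eq_not, Bool.not_true, decide_eq_false_iff_not, not_lt] at hA
    have hle : List.count (PySem.Chars.upperChar i) (PySem.Chars.upper em)
        ≤ m.countP (pA (em.length : Int) (PySem.Chars.upperChar i)) := by exact_mod_cast hA
    simp only [Function.comp_apply]
    rw [hcount i hi, hpool i hi]
    simpa [PySem.Chars.upper] using hle
  · intro h i hi
    have hx : (encodeChar (em.length % 26) (PySem.Chars.upperChar i))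
        ∈ (List.map PySem.Chars.upperChar em).map (encodeChar (em.length % 26)) := by
      simp only [List.map_map, List.mem_map]
      exact ⟨i, hi, rfl⟩
    have hB := h _ hx
    rw [hcount i hi, hpool i hi] at hB
    rw [count_py_upper, countA_decipher]
    simp only [Bool.not_eq_eq_eq_not, Bool.not_true, decide_eq_false_iff_not, not_lt]
    have : List.count (PySem.Chars.upperChar i) (List.map PySem.Chars.upperChar em)
        ≤ m.countP (pA (em.length : Int) (PySem.Chars.upperChar i)) := hB
    simp only [PySem.Chars.upper]
    exact_mod_cast this

-- the six possible first tokens under Pre_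
lemma name_cases (s : String) (h : Name_emblem_dict.contains s = true) :
    s = "SPACE" ∨ s = "LAND" ∨ s = "WATER" ∨ s = "ICE" ∨ s = "AIR" ∨ s = "FIRE" := by
  rw [show Name_emblem_dict = (⟨[("SPACE","Gorilla"),("LAND","Panda"),("WATER","octopus"),
        ("ICE","Mammoth"),("AIR","Owl"),("FIRE","Dragon")]⟩ : PySem.Dict String String) from by decide] at h
  rw [PySem.Dict.contains_mk] at h
  simp only [List.any_cons, List.any_nil, Bool.or_eq_true, beq_iff_eq, Bool.or_false] at h
  tauto

-- ===== VERDICT (by name: the statement is the Claim_ definition above) =====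
set_option maxRecDepth 4096 in
theorem does_support_spec : Claim_equal_does_support := by
  intro Input _ hPre
  unfold Pre_does_support at hPre
  unfold Spec_does_support does_support does_support_alt
  rcases name_cases _ hPre with h | h | h | h | h | h
  · simp only [h, show ((Name_emblem_dict.get? "SPACE").getD "").toList = ['G','o','r','i','l','l','a'] from by decide]
    exact congrArg₂ Prod.mk (flag_bridge _ _ (by decide) (by decide)) rfl
  · simp only [h, show ((Name_emblem_dict.get? "LAND").getD "").toList = ['P','a','n','d','a'] from by decide]
    exact congrArg₂ Prod.mk (flag_bridge _ _ (by decide) (by decide)) rfl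
  · simp only [h, show ((Name_emblem_dict.get? "WATER").getD "").toList = ['o','c','t','o','p','u','s'] from by decide]
    exact congrArg₂ Prod.mk (flag_bridge _ _ (by decide) (by decide)) rfl
  · simp only [h, show ((Name_emblem_dict.get? "ICE").getD "").toList = ['M','a','m','m','o','t','h'] from by decide]
    exact congrArg₂ Prod.mk (flag_bridge _ _ (by decide) (by decide)) rfl
  · simp only [h, show ((Name_emblem_dict.get? "AIR").getD "").toList = ['O','w','l'] from by decide]
    exact congrArg₂ Prod.mk (flag_bridge _ _ (by decide) (by decide)) rfl
  · simp only [h, show ((Name_emblem_dict.get? "FIRE").getD "").toList = ['D','r','a','g','o','n'] from by decide]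
    exact congrArg₂ Prod.mk (flag_bridge _ _ (by decide) (by decide)) rfl
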